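-- pv_equiv track=rewrite | github.com/MelanyAvila/TP-final-progra-1 | por_consola/funciones.py | calcular_envido
-- ===== SOURCE A (Python) =====
-- def calcular_envido(mano) -> int:
--     """
--     Calcula el valor del envido para una mano.
--
--     Parámetros:
--         mano (list[tuple[int, str]]): La mano del jugador, representada por una lista de tuplas (valor, palo).
--
--     Retorna:
--         int: El valor máximo del envido en la mano.
--     """
--     palos = {}
--     for carta in mano:
--         if carta[1] not in palos:
--             palos[carta[1]] = []
--         palos[carta[1]].append(carta[0])
--     max_envido = 0
--     for cartas in palos.values():
--         if len(cartas) > 1: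
--             max_envido = max(max_envido, sum(sorted(cartas)[-2:]) + 20)
--     return max_envido
-- ===== SOURCE B (Python) =====
-- def calcular_envido(mano) -> int:
--     """Valor maximo de envido: recursion sobre la mano, comparando la primera
--     carta con cada carta restante del mismo palo (sin dict ni sort)."""
--     if not mano:
--         return 0
--     valor, palo = mano[0]
--     resto = mano[1:]
--     mejor = calcular_envido(resto)
--     for v, p in resto:
--         if palo == p:
--             mejor = max(mejor, valor + v + 20)
--     return mejor
-- ===== Notes on version B (the rewrite author's own statement) =====
-- stated objective: alternative
-- what changed: Replaces the suit-grouping dict plus per-group sort-and-top-two with a head recursion that takes the maximum of valor1+valor2+20 over all same-suit card pairs.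
import Mathlib
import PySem

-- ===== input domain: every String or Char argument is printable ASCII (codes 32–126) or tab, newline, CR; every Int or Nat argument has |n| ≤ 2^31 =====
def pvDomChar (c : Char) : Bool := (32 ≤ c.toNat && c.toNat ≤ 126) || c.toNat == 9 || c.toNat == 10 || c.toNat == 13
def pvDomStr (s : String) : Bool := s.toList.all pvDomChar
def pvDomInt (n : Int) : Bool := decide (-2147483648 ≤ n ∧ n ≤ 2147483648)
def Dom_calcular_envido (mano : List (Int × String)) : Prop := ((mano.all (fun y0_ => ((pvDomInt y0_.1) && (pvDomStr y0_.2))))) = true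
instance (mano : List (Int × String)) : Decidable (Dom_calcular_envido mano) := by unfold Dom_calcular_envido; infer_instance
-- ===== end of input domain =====

-- B replaces A's suit-grouping dict + per-group sort-and-top-two with a head recursion
-- maximizing valor1+valor2+20 over all same-suit card pairs (alternative decomposition).


-- ===== PORT A =====
def calcular_envido (mano : List (Int × String)) : Int :=
  let palos : PySem.Dict String (List Int) :=
    mano.foldl (fun palos carta =>
      let palos := if palos.contains carta.2 then palos else palos.insert carta.2 []
      palos.modify carta.2 [] (fun l => l ++ [carta.1])) PySem.Dict.empty
  palos.values.foldl (fun max_envido cartas =>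
    if 1 < cartas.length then
      max max_envido ((PySem.List.slice (PySem.List.sorted cartas (fun x => x)) (some (-2)) none).sum + 20)
    else max_envido) 0

-- ===== PORT B =====
def calcular_envido_alt : List (Int × String) → Int
  | [] => 0
  | (valor, palo) :: resto =>
    resto.foldl (fun mejor c => if palo == c.2 then max mejor (valor + c.1 + 20) else mejor)
      (calcular_envido_alt resto)

-- ===== PRECONDITION & SPEC =====
def Spec_calcular_envido (mano : List (Int × String)) (out : Int) : Prop := out = calcular_envido_alt mano
instance (mano : List (Int × String)) (out : Int) : Decidable (Spec_calcular_envido mano out) := by unfold Spec_calcular_envido; infer_instance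

-- ===== CLAIM (what is proved, stated in full; the proofs are below) =====
def Claim_equal_calcular_envido : Prop := ∀ (mano : List (Int × String)), Dom_calcular_envido mano → Spec_calcular_envido mano (calcular_envido mano)

-- ===== LEMMAS AND PROOFS =====

-- max of a list of ints and 0 (the 0-floored supremum both loops compute)
def pvSup0 (l : List Int) : Int := l.foldr max 0

-- values of the cards of suit s, in hand order (what A's dict stores under key s)
def pvValsOf (s : String) (mano : List (Int × String)) : List Int :=
  (mano.filter (fun c => c.2 == s)).map (fun c => c.1)

-- all pair sums (+20) within one value list
def pvPairVals : List Int → List Int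
  | [] => []
  | v :: t => t.map (fun b => v + b + 20) ++ pvPairVals t

-- all same-suit pair sums (+20) of a hand
def pvPairSums : List (Int × String) → List Int
  | [] => []
  | (v, p) :: r => (r.filter (fun c => p == c.2)).map (fun c => v + c.1 + 20) ++ pvPairSums r

theorem pvSup0_nonneg (l : List Int) : 0 ≤ pvSup0 l := by
  induction l with
  | nil => simp [pvSup0]
  | cons x t ih => simp only [pvSup0, List.foldr] at *; omega

theorem le_pvSup0_of_mem {l : List Int} {x : Int} (h : x ∈ l) : x ≤ pvSup0 l := by
  induction l with
  | nil => simp at h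
  | cons y t ih =>
    simp only [pvSup0, List.foldr] at *
    rcases List.mem_cons.mp h with h | h
    · omega
    · have := ih h; omega

theorem pvSup0_le {l : List Int} {y : Int} (hy : 0 ≤ y) (h : ∀ x ∈ l, x ≤ y) : pvSup0 l ≤ y := by
  induction l with
  | nil => simpa [pvSup0]
  | cons x t ih =>
    simp only [pvSup0, List.foldr] at *
    have h1 := h x (by simp)
    have h2 := ih (fun z hz => h z (by simp [hz]))
    omega

theorem pvSup0_append (l1 l2 : List Int) : pvSup0 (l1 ++ l2) = max (pvSup0 l1) (pvSup0 l2) := by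
  induction l1 with
  | nil => have := pvSup0_nonneg l2; simp [pvSup0] at *; omega
  | cons x t ih => simp only [pvSup0, List.foldr, List.cons_append] at *; omega

-- a loop 'if p x then acc = max acc (f x)' computes max of init and the 0-floored sup of the hits
theorem pv_foldl_ite_max {α : Type} (p : α → Prop) [DecidablePred p] (f : α → Int) :
    ∀ (l : List α) (a : Int), 0 ≤ a →
      l.foldl (fun b x => if p x then max b (f x) else b) a
        = max a (pvSup0 ((l.filter (fun x => decide (p x))).map f)) := by
  intro l
  induction l with
  | nil => intro a ha; simp [pvSup0]; omega
  | cons x t ih =>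
    intro a ha
    by_cases hx : p x
    · rw [List.foldl_cons, if_pos hx, ih (max a (f x)) (by omega)]
      have hf : (x :: t).filter (fun x => decide (p x)) = x :: t.filter (fun x => decide (p x)) := by
        simp [hx]
      rw [hf]
      simp only [List.map_cons, pvSup0, List.foldr]
      omega
    · rw [List.foldl_cons, if_neg hx, ih a ha]
      have hf : (x :: t).filter (fun x => decide (p x)) = t.filter (fun x => decide (p x)) := by
        simp [hx]
      rw [hf]

-- B computes the 0-floored sup of all same-suit pair sums
theorem pv_alt_eq_sup0 (mano : List (Int × String)) :
    calcular_envido_alt mano = pvSup0 (pvPairSums mano) := by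
  induction mano with
  | nil => simp [calcular_envido_alt, pvPairSums, pvSup0]
  | cons c r ih =>
    obtain ⟨v, p⟩ := c
    rw [calcular_envido_alt, ih,
      pv_foldl_ite_max (fun c => (p == c.2) = true) (fun c => v + c.1 + 20) r _
        (pvSup0_nonneg _)]
    rw [pvPairSums, pvSup0_append]
    simp only [Bool.decide_eq_true]
    omega

-- the guarded dict update of A is exactly Dict.modify
theorem pv_stepA_eq (d : PySem.Dict String (List Int)) (carta : Int × String) :
    (let d' := if d.contains carta.2 then d else d.insert carta.2 []
     d'.modify carta.2 [] (fun l => l ++ [carta.1]))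
      = d.modify carta.2 [] (fun l => l ++ [carta.1]) := by
  show (if d.contains carta.2 then d else d.insert carta.2 []).modify carta.2 []
      (fun l => l ++ [carta.1]) = _
  by_cases h : d.contains carta.2
  · rw [if_pos h]
  · rw [if_neg h]
    simp only [PySem.Dict.modify, PySem.Dict.getD_insert_self, PySem.Dict.insert_insert_self,
      PySem.Dict.getD_of_not_contains d ([] : List Int) (Bool.not_eq_true _ ▸ h)]

theorem pv_palos_eq (mano : List (Int × String)) :
    mano.foldl (fun palos carta =>
      let palos := if palos.contains carta.2 then palos else palos.insert carta.2 []
      palos.modify carta.2 [] (fun l => l ++ [carta.1])) PySem.Dict.empty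
    = mano.foldl (fun d c => d.modify c.2 [] (fun l => l ++ [c.1])) PySem.Dict.empty := by
  congr 1
  funext d c
  exact pv_stepA_eq d c

theorem pv_keys_palos (mano : List (Int × String)) :
    (mano.foldl (fun d (c : Int × String) => d.modify c.2 [] (fun l => l ++ [c.1]))
        PySem.Dict.empty).keys
      = PySem.Set.ofList (mano.map (fun c => c.2)) := by
  rw [PySem.Dict.keys_foldl_modify_key mano (fun c => c.2) [] (fun _ c => fun l => l ++ [c.1])]
  simp only [PySem.Dict.keys_empty, PySem.Set.update_nil_left]

theorem pv_getD_palos (mano : List (Int × String)) (s : String) :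
    (mano.foldl (fun d (c : Int × String) => d.modify c.2 [] (fun l => l ++ [c.1]))
        PySem.Dict.empty).getD s []
      = pvValsOf s mano := by
  have h : mano.foldl (fun d (c : Int × String) => d.modify c.2 [] (fun l => l ++ [c.1]))
        PySem.Dict.empty
      = (mano.map (fun c => (c.2, c.1))).foldl
          (fun d p => d.modify p.1 [] (fun l => l ++ [p.2])) PySem.Dict.empty := by
    rw [List.foldl_map]
  rw [h, PySem.Dict.getD_foldl_modify_append]
  simp [pvValsOf, List.filter_map, Function.comp_def, List.map_map]

-- A computes the 0-floored sup of per-suit top-two contributions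
theorem pv_A_eq_sup0 (mano : List (Int × String)) :
    calcular_envido mano
      = pvSup0 (((PySem.Set.ofList (mano.map (fun c => c.2))).filter
            (fun s => decide (1 < (pvValsOf s mano).length))).map
          (fun s => (PySem.List.slice (PySem.List.sorted (pvValsOf s mano) (fun x => x)) (some (-2)) none).sum + 20)) := by
  unfold calcular_envido
  rw [pv_palos_eq]
  have hnodup : (mano.foldl (fun d (c : Int × String) => d.modify c.2 [] (fun l => l ++ [c.1]))
      PySem.Dict.empty).keys.Nodup := by
    apply PySem.Dict.nodup_keys_foldl_modify_key mano (fun c => c.2) [] (fun _ c => fun l => l ++ [c.1])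
    simp [PySem.Dict.keys_empty]
  show (mano.foldl (fun d (c : Int × String) => d.modify c.2 [] (fun l => l ++ [c.1]))
      PySem.Dict.empty).values.foldl (fun max_envido cartas =>
    if 1 < cartas.length then
      max max_envido ((PySem.List.slice (PySem.List.sorted cartas (fun x => x)) (some (-2)) none).sum + 20)
    else max_envido) 0 = _
  rw [PySem.Dict.values_eq_map_keys _ hnodup [], pv_keys_palos mano]
  simp only [pv_getD_palos]
  rw [pv_foldl_ite_max (fun cartas : List Int => 1 < cartas.length)
    (fun cartas => (PySem.List.slice (PySem.List.sorted cartas (fun x => x)) (some (-2)) none).sum + 20)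
    _ 0 le_rfl]
  rw [max_eq_right (pvSup0_nonneg _)]
  simp only [List.filter_map, List.map_map, Function.comp_def]

theorem pv_valsOf_cons (s : String) (v : Int) (p : String) (r : List (Int × String)) :
    pvValsOf s ((v, p) :: r) = if p = s then v :: pvValsOf s r else pvValsOf s r := by
  by_cases h : p = s <;> simp [pvValsOf, h]

-- the pair sums are invariant (as a set) under permutation of the value list
theorem pv_mem_pairVals_of_perm {g g' : List Int} (h : g.Perm g') {x : Int} :
    x ∈ pvPairVals g ↔ x ∈ pvPairVals g' := by
  induction h with
  | nil => rfl
  | cons a h ih => simp [pvPairVals, h.mem_iff, ih]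
  | swap a b l =>
    simp only [pvPairVals, List.mem_append, List.mem_cons, List.mem_map]
    constructor
    · rintro (⟨z, hz | hz, rfl⟩ | ⟨z, hz, rfl⟩ | h)
      · subst hz; exact Or.inl ⟨b, Or.inl rfl, by omega⟩
      · exact Or.inr (Or.inl ⟨z, hz, rfl⟩)
      · exact Or.inl ⟨z, Or.inr hz, rfl⟩
      · exact Or.inr (Or.inr h)
    · rintro (⟨z, hz | hz, rfl⟩ | ⟨z, hz, rfl⟩ | h)
      · subst hz; exact Or.inl ⟨a, Or.inl rfl, by omega⟩
      · exact Or.inr (Or.inl ⟨z, hz, rfl⟩)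
      · exact Or.inl ⟨z, Or.inr hz, rfl⟩
      · exact Or.inr (Or.inr h)
  | trans h1 h2 ih1 ih2 => exact ih1.trans ih2

-- index characterisation of the pair sums of a list
theorem pv_mem_pairVals_iff {g : List Int} {x : Int} :
    x ∈ pvPairVals g ↔ ∃ i j, ∃ (_ : i < g.length) (_ : j < g.length),
      i < j ∧ x = g[i] + g[j] + 20 := by
  induction g generalizing x with
  | nil => simp [pvPairVals]
  | cons v t ih =>
    simp only [pvPairVals, List.mem_append, List.mem_map, ih]
    constructor
    · rintro (⟨b, hb, rfl⟩ | ⟨i, j, hi, hj, hij, rfl⟩)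
      · rcases List.mem_iff_getElem.mp hb with ⟨j, hj, rfl⟩
        exact ⟨0, j + 1, by simp only [List.length_cons]; omega,
          by simp only [List.length_cons]; omega, by omega, by simp⟩
      · exact ⟨i + 1, j + 1, by simp only [List.length_cons]; omega,
          by simp only [List.length_cons]; omega, by omega, by simp⟩
    · rintro ⟨i, j, hi, hj, hij, rfl⟩
      match i, j with
      | 0, j + 1 =>
        exact Or.inl ⟨t[j]'(by simpa using hj), List.getElem_mem _, by simp⟩
      | i + 1, j + 1 =>
        exact Or.inr ⟨i, j, by simpa using hi, by simpa using hj, by omega, by simp⟩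

-- membership spine: a hand's same-suit pair sums are exactly the per-suit pair sums
theorem pv_mem_pairSums_iff {mano : List (Int × String)} {x : Int} :
    x ∈ pvPairSums mano ↔ ∃ s, x ∈ pvPairVals (pvValsOf s mano) := by
  induction mano generalizing x with
  | nil => simp [pvPairSums, pvValsOf, pvPairVals]
  | cons c r ih =>
    obtain ⟨v, p⟩ := c
    simp only [pvPairSums, List.mem_append, List.mem_map, List.mem_filter, ih]
    constructor
    · rintro (⟨cc, ⟨hcr, hcp⟩, rfl⟩ | ⟨s, hs⟩)
      · refine ⟨p, ?_⟩
        rw [pv_valsOf_cons p v p r, if_pos rfl]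
        simp only [pvPairVals, List.mem_append, List.mem_map]
        have hmem : cc.1 ∈ pvValsOf p r := by
          simp only [pvValsOf, List.mem_map, List.mem_filter]
          exact ⟨cc, ⟨hcr, by have h1 := beq_iff_eq.mp hcp; simp [h1]⟩, rfl⟩
        exact Or.inl ⟨cc.1, hmem, rfl⟩
      · refine ⟨s, ?_⟩
        rw [pv_valsOf_cons s v p r]
        by_cases hp : p = s
        · rw [if_pos hp]
          simp only [pvPairVals, List.mem_append]
          exact Or.inr (hp ▸ hs)
        · rw [if_neg hp]; exact hs
    · rintro ⟨s, hs⟩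
      rw [pv_valsOf_cons s v p r] at hs
      by_cases hp : p = s
      · rw [if_pos hp] at hs
        subst hp
        simp only [pvPairVals, List.mem_append, List.mem_map] at hs
        rcases hs with ⟨b, hb, rfl⟩ | hs
        · simp only [pvValsOf, List.mem_map, List.mem_filter] at hb
          rcases hb with ⟨cc, ⟨hcr, hcp⟩, rfl⟩
          exact Or.inl ⟨cc, ⟨hcr, by have h1 := beq_iff_eq.mp hcp; simp [h1]⟩, rfl⟩
        · exact Or.inr ⟨p, hs⟩
      · rw [if_neg hp] at hs
        exact Or.inr ⟨s, hs⟩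

theorem pv_sorted_len (g : List Int) : (PySem.List.sorted g (fun x => x)).length = g.length :=
  (PySem.List.sorted_perm g (fun x => x) false).length_eq

-- the [-2:] slice of the sorted list sums its two largest entries
theorem pv_top2_sum (g : List Int) (h2 : 2 ≤ g.length) :
    (PySem.List.slice (PySem.List.sorted g (fun x => x)) (some (-2)) none).sum
      = (PySem.List.sorted g (fun x => x))[g.length - 2]'(by rw [pv_sorted_len]; omega)
        + (PySem.List.sorted g (fun x => x))[g.length - 1]'(by rw [pv_sorted_len]; omega) := by
  set t := PySem.List.sorted g (fun x => x) with ht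
  have hl : t.length = g.length := pv_sorted_len g
  rw [PySem.List.slice_from_neg_ofNat t 2 (by omega)]
  rw [List.drop_eq_getElem_cons (by omega : t.length - 2 < t.length)]
  rw [List.drop_eq_getElem_cons (by omega : t.length - 2 + 1 < t.length)]
  rw [List.drop_eq_nil_of_le (by omega : t.length ≤ t.length - 2 + 1 + 1)]
  have e1 : t.length - 2 = g.length - 2 := by omega
  have e3 : g.length - 2 + 1 = g.length - 1 := by omega
  simp only [List.sum_cons, List.sum_nil, add_zero, e1, e3, ← ht]

-- A's per-suit contribution is itself one of the suit's pair sums …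
theorem pv_top2_mem (g : List Int) (h2 : 2 ≤ g.length) :
    (PySem.List.slice (PySem.List.sorted g (fun x => x)) (some (-2)) none).sum + 20
      ∈ pvPairVals g := by
  rw [pv_top2_sum g h2]
  rw [pv_mem_pairVals_of_perm (PySem.List.sorted_perm g (fun x => x) false).symm]
  rw [pv_mem_pairVals_iff]
  exact ⟨g.length - 2, g.length - 1, by rw [pv_sorted_len]; omega, by rw [pv_sorted_len]; omega,
    by omega, rfl⟩

-- … and it bounds all of them
theorem pv_le_top2 (g : List Int) {x : Int} (h : x ∈ pvPairVals g) :
    x ≤ (PySem.List.slice (PySem.List.sorted g (fun x => x)) (some (-2)) none).sum + 20 := by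
  have h2 : 2 ≤ g.length := by
    rcases pv_mem_pairVals_iff.mp h with ⟨i, j, hi, hj, hij, _⟩
    omega
  rw [pv_top2_sum g h2]
  rw [pv_mem_pairVals_of_perm (PySem.List.sorted_perm g (fun x => x) false).symm] at h
  rcases pv_mem_pairVals_iff.mp h with ⟨i, j, hi, hj, hij, rfl⟩
  have hl : (PySem.List.sorted g (fun x => x)).length = g.length := pv_sorted_len g
  have hp := List.pairwise_iff_getElem.mp (PySem.List.sorted_pairwise g (fun x => x))
  have b1 : (PySem.List.sorted g (fun x => x))[i] ≤
      (PySem.List.sorted g (fun x => x))[g.length - 2]'(by omega) := by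
    rcases Nat.lt_or_ge i (g.length - 2) with hlt | hge
    · exact hp i (g.length - 2) hi (by omega) hlt
    · have : i = g.length - 2 := by omega
      subst this; rfl
  have b2 : (PySem.List.sorted g (fun x => x))[j] ≤
      (PySem.List.sorted g (fun x => x))[g.length - 1]'(by omega) := by
    rcases Nat.lt_or_ge j (g.length - 1) with hlt | hge
    · exact hp j (g.length - 1) hj (by omega) hlt
    · have : j = g.length - 1 := by omega
      subst this; rfl
  omega

-- a suit whose value list has two entries occurs in the hand
theorem pv_suit_mem {s : String} {mano : List (Int × String)} (h2 : 2 ≤ (pvValsOf s mano).length) :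
    s ∈ PySem.Set.ofList (mano.map (fun c => c.2)) := by
  rw [PySem.Set.mem_ofList, List.mem_map]
  have hne : mano.filter (fun c => c.2 == s) ≠ [] := by
    intro h0
    simp [pvValsOf, h0] at h2
  rcases List.exists_mem_of_ne_nil _ hne with ⟨c, hc⟩
  rcases List.mem_filter.mp hc with ⟨hcm, hcs⟩
  exact ⟨c, hcm, beq_iff_eq.mp hcs⟩

-- ===== VERDICT (by name: the statement is the Claim_ definition above) =====
theorem calcular_envido_spec : Claim_equal_calcular_envido := by
  intro mano _
  unfold Spec_calcular_envido
  rw [pv_A_eq_sup0, pv_alt_eq_sup0]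
  apply le_antisymm
  · apply pvSup0_le (pvSup0_nonneg _)
    intro x hx
    rcases List.mem_map.mp hx with ⟨s, hsf, rfl⟩
    rcases List.mem_filter.mp hsf with ⟨_, hlen⟩
    have h2 : 2 ≤ (pvValsOf s mano).length := by
      have := of_decide_eq_true hlen; omega
    apply le_pvSup0_of_mem
    exact pv_mem_pairSums_iff.mpr ⟨s, pv_top2_mem _ h2⟩
  · apply pvSup0_le (pvSup0_nonneg _)
    intro x hx
    rcases pv_mem_pairSums_iff.mp hx with ⟨s, hs⟩
    have h2 : 2 ≤ (pvValsOf s mano).length := by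
      rcases pv_mem_pairVals_iff.mp hs with ⟨i, j, hi, hj, hij, _⟩
      omega
    refine le_trans (pv_le_top2 _ hs) (le_pvSup0_of_mem ?_)
    refine List.mem_map.mpr ⟨s, List.mem_filter.mpr ⟨pv_suit_mem h2, ?_⟩, rfl⟩
    exact decide_eq_true (by omega)
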